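-- pv_equiv track=rewrite | github.com/boknowswiki/mytraning | lintcode/python/1821_min_deletions_to_obtain_string_in_right_format.py | minDeletionsToObtainStringInRightFormat
-- ===== SOURCE A (Python) =====
-- def minDeletionsToObtainStringInRightFormat(s):
--     # write your code here
--     n = len(s)
--
--     # at index i, there are count_A of A after index i, count_B of B before index i to make all A before all B.
--     count_A = 0
--     count_B = 0
--
--     for c in s:
--         if c == 'A':
--             count_A += 1
--
--     # max delete number of letters.
--     ret = count_A
--
--     for c in s:
--         if c == 'A':
--             count_A -= 1
--         else:
--             count_B += 1
--
--         ret = min(ret, count_A+count_B)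
--
--     return ret
-- ===== SOURCE B (Python) =====
-- def minDeletionsToObtainStringInRightFormat(s):
--     # single pass: res = best deletions so far, count_b = B's seen so far
--     res = 0
--     count_b = 0
--     for c in s:
--         if c == 'A':
--             res = min(res + 1, count_b)
--         else:
--             count_b += 1
--     return res
-- ===== Notes on version B (the rewrite author's own statement) =====
-- stated objective: simpler
-- what changed: Replaces A's two passes (precompute the total count of the first-letter kind, then scan minimizing remaining-first-kind plus seen-second-kind) by a single-pass DP keeping only the best-deletions-so-far and the count of second-kind characters seen.
import Mathlib
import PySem

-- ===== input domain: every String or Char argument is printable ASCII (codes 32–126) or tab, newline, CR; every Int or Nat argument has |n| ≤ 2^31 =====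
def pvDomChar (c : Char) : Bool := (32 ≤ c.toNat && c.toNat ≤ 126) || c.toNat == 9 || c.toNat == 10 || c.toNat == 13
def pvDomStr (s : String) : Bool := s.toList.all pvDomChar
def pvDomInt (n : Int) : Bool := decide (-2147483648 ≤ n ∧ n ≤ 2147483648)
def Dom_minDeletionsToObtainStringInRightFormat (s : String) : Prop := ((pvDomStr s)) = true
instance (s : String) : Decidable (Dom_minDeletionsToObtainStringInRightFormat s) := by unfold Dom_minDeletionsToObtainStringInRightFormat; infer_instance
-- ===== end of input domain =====

-- B replaces A's two passes by one single-pass DP keeping (best-so-far, count of second-kind chars); one pass over the string instead of two.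


-- ===== PORT A =====
-- step of A's second loop: state (count_A, count_B, ret)
def pvStepA (st : Int × Int × Int) (c : Char) : Int × Int × Int :=
  if c = 'A' then (st.1 - 1, st.2.1, min st.2.2 (st.1 - 1 + st.2.1))
  else (st.1, st.2.1 + 1, min st.2.2 (st.1 + (st.2.1 + 1)))

def minDeletionsToObtainStringInRightFormat (s : String) : Int :=
  let _n : Int := PySem.Str.len s
  -- first loop: count the 'A's
  let count_A : Int := s.toList.foldl (fun acc c => if c = 'A' then acc + 1 else acc) 0
  let count_B : Int := 0
  let ret : Int := count_A
  -- second loop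
  (s.toList.foldl pvStepA (count_A, count_B, ret)).2.2

-- ===== PORT B =====
-- step of B's single loop: state (count_b, res)
def pvStepB (st : Int × Int) (c : Char) : Int × Int :=
  if c = 'A' then (st.1, min (st.2 + 1) st.1) else (st.1 + 1, st.2)

def minDeletionsToObtainStringInRightFormat_alt (s : String) : Int :=
  (s.toList.foldl pvStepB (0, 0)).2

-- ===== PRECONDITION & SPEC =====
def Spec_minDeletionsToObtainStringInRightFormat (s : String) (out : Int) : Prop := out = minDeletionsToObtainStringInRightFormat_alt s
instance (s : String) (out : Int) : Decidable (Spec_minDeletionsToObtainStringInRightFormat s out) := by unfold Spec_minDeletionsToObtainStringInRightFormat; infer_instance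

-- ===== CLAIM (what is proved, stated in full; the proofs are below) =====
def Claim_equal_minDeletionsToObtainStringInRightFormat : Prop := ∀ (s : String), Dom_minDeletionsToObtainStringInRightFormat s → Spec_minDeletionsToObtainStringInRightFormat s (minDeletionsToObtainStringInRightFormat s)

-- ===== LEMMAS AND PROOFS =====
-- number of 'A's in a list, the recursive handle on A's first loop
def pvCntA : List Char → Int
  | [] => 0
  | c :: cs => (if c = 'A' then 1 else 0) + pvCntA cs

theorem pvCntA_foldl (l : List Char) (a : Int) :
    l.foldl (fun acc c => if c = 'A' then acc + 1 else acc) a = a + pvCntA l := by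
  induction l generalizing a with
  | nil => simp [pvCntA]
  | cons c cs ih => simp only [List.foldl_cons, pvCntA, ih]; split <;> ring

-- coupled-loop invariant: if res ≤ cb then A's fold from (pvCntA l, cb, res + pvCntA l)
-- agrees with B's fold from (cb, res), shifted by the A's remaining in l.
theorem pvAB (l : List Char) (cb res : Int) (h : res ≤ cb) :
    (l.foldl pvStepA (pvCntA l, cb, res + pvCntA l)).2.2 = (l.foldl pvStepB (cb, res)).2 := by
  induction l generalizing cb res with
  | nil => simp [pvCntA]
  | cons c cs ih =>
    by_cases hc : c = 'A'
    · simp only [List.foldl_cons, pvStepA, pvStepB, hc, pvCntA, reduceIte]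
      have e1 : (1 : Int) + pvCntA cs - 1 = pvCntA cs := by ring
      have e2 : min (res + (1 + pvCntA cs)) (pvCntA cs + cb)
          = min (res + 1) cb + pvCntA cs := by
        rcases le_total (res + 1) cb with h2 | h2
        · rw [min_eq_left (by omega), min_eq_left (by omega)]; ring
        · rw [min_eq_right (by omega), min_eq_right (by omega)]; ring
      rw [e1, e2]
      exact ih cb (min (res + 1) cb) (min_le_right _ _)
    · simp only [List.foldl_cons, pvStepA, pvStepB, pvCntA, if_neg hc, zero_add]
      have e2 : min (res + pvCntA cs) (pvCntA cs + (cb + 1)) = res + pvCntA cs := by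
        rw [min_eq_left (by omega)]
      rw [e2]
      exact ih (cb + 1) res (by omega)

-- ===== VERDICT (by name: the statement is the Claim_ definition above) =====
theorem minDeletionsToObtainStringInRightFormat_spec : Claim_equal_minDeletionsToObtainStringInRightFormat := by
  intro s _
  unfold Spec_minDeletionsToObtainStringInRightFormat
  unfold minDeletionsToObtainStringInRightFormat minDeletionsToObtainStringInRightFormat_alt
  simp only [pvCntA_foldl, zero_add]
  have := pvAB s.toList 0 0 le_rfl
  simpa using this
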